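-- pv_equiv track=rewrite | github.com/Lognam-Huang/MetaFANET-DT | eval_tools/model_b/model_b_functions.py | select_eval_cases
-- ===== SOURCE A (Python) =====
-- def select_eval_cases(cases, include_ids=None, exclude_ids=None, pattern: str | None = None, limit: int | None = None):
--     """
--     Filter cases by ids / glob-like pattern / limit.
--     - include_ids: list of ids to keep (None means keep all)
--     - exclude_ids: list of ids to drop
--     - pattern: simple substring match for now (可以后续改成 fnmatch)
--     """
--     out = list(cases)
--
--     if include_ids:
--         include_set = set(include_ids)
--         out = [c for c in out if c.get("id") in include_set]
--
--     if exclude_ids: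
--         exclude_set = set(exclude_ids)
--         out = [c for c in out if c.get("id") not in exclude_set]
--
--     if pattern:
--         out = [c for c in out if pattern in str(c.get("id", ""))]
--
--     if limit is not None:
--         out = out[: int(limit)]
--
--     return out
-- ===== SOURCE B (Python) =====
-- def select_eval_cases(cases, include_ids=None, exclude_ids=None, pattern: str | None = None, limit: int | None = None):
--     """Memoized strategy: decide keep/drop ONCE per distinct id value in a
--     verdict table, then select cases by a single table lookup and slice by limit."""
--     inc = set(include_ids) if include_ids else None
--     exc = set(exclude_ids) if exclude_ids else None
--     pat = pattern if pattern else None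
--
--     verdict = {}
--     for c in cases:
--         i = c.get("id")
--         if i not in verdict:
--             ok = True
--             if inc is not None:
--                 ok = i in inc
--             if ok and exc is not None:
--                 ok = i not in exc
--             if ok and pat is not None:
--                 ok = pat in (i if i is not None else "")
--             verdict[i] = ok
--
--     out = [c for c in cases if verdict[c.get("id")]]
--     return out[: int(limit)] if limit is not None else out
-- ===== Notes on version B (the rewrite author's own statement) =====
-- stated objective: alternative
-- what changed: Instead of A's three sequential list-rebuilding filter passes, B first builds a memo table that records the keep/drop verdict once per DISTINCT id value, then selects cases by a single table lookup, then applies the same limit slice.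
import Mathlib
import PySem

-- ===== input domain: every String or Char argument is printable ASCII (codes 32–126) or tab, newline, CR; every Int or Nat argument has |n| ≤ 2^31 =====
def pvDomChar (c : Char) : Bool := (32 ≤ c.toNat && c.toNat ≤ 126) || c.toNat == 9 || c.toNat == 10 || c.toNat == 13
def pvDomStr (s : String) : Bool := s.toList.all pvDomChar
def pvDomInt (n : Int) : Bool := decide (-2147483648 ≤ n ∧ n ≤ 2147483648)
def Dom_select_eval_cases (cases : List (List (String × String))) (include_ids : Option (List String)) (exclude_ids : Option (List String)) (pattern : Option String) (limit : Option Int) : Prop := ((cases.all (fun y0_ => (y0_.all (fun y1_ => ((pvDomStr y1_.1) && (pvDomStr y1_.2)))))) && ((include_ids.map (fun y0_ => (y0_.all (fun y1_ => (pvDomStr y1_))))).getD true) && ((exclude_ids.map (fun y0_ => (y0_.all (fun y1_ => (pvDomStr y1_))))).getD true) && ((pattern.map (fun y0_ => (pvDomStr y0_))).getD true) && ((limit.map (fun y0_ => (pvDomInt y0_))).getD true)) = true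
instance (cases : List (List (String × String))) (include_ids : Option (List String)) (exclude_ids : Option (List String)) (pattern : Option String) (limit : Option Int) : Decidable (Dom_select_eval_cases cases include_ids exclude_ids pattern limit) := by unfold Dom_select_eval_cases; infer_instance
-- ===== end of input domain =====

-- B replaces A's three sequential list-rebuilding filter passes with a memo table holding the
-- keep/drop verdict once per distinct id, then one lookup pass and the same limit slice (objective: alternative).


-- ===== PORT A =====
-- c.get("id") on a case dict (first-match lookup, dict convention)
def pvGetId (c : List (String × String)) : Option String := (PySem.Dict.mk c).get? "id"

def select_eval_cases (cases : List (List (String × String))) (include_ids : Option (List String)) (exclude_ids : Option (List String)) (pattern : Option String) (limit : Option Int) : List (List (String × String)) :=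
  let out := cases
  -- if include_ids:  (truthy = some non-empty list)
  let out := match include_ids with
    | some ids =>
        if ids.isEmpty then out else
          let include_set := PySem.Set.ofList ids
          out.filter (fun c => match pvGetId c with
            | some v => PySem.Set.contains include_set v
            | none => false)   -- None is never in a set of strings
    | none => out
  -- if exclude_ids:
  let out := match exclude_ids with
    | some ids =>
        if ids.isEmpty then out else
          let exclude_set := PySem.Set.ofList ids
          out.filter (fun c => !(match pvGetId c with
            | some v => PySem.Set.contains exclude_set v
            | none => false))
    | none => out
  -- if pattern:  (truthy = some non-empty string);  pattern in str(c.get("id",""))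
  let out := match pattern with
    | some p =>
        if p.isEmpty then out else
          out.filter (fun c => PySem.Str.isIn p ((pvGetId c).getD ""))
    | none => out
  -- if limit is not None: out = out[:int(limit)]
  match limit with
  | some n => PySem.List.slice out none (some n)
  | none => out

-- ===== PORT B =====
-- 'i in s' for an optional id against a set of strings (None is never in a set of strings)
def pvMemSet (s : PySem.Set String) (i : Option String) : Bool :=
  match i with | some v => PySem.Set.contains s v | none => false

-- the body computing 'ok' for one id i (transliteration of Source B's chain of guarded assignments)
def pvOk (inc? exc? : Option (PySem.Set String)) (pat? : Option String) (i : Option String) : Bool :=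
  let ok := true
  let ok := match inc? with | some s => pvMemSet s i | none => ok
  let ok := if ok then (match exc? with | some s => !(pvMemSet s i) | none => ok) else ok
  let ok := if ok then (match pat? with | some p => PySem.Str.isIn p (i.getD "") | none => ok) else ok
  ok

-- the verdict table: for each case, if its id is not yet a key, record ok for it
def pvVerdict (inc? exc? : Option (PySem.Set String)) (pat? : Option String)
    (cases : List (List (String × String))) : PySem.Dict (Option String) Bool :=
  cases.foldl (fun d c =>
    let i := pvGetId c
    if d.contains i then d else d.insert i (pvOk inc? exc? pat? i)) PySem.Dict.empty

def select_eval_cases_alt (cases : List (List (String × String))) (include_ids : Option (List String)) (exclude_ids : Option (List String)) (pattern : Option String) (limit : Option Int) : List (List (String × String)) :=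
  let inc? : Option (PySem.Set String) := match include_ids with
    | some ids => if ids.isEmpty then none else some (PySem.Set.ofList ids)
    | none => none
  let exc? : Option (PySem.Set String) := match exclude_ids with
    | some ids => if ids.isEmpty then none else some (PySem.Set.ofList ids)
    | none => none
  let pat? : Option String := match pattern with
    | some p => if p.isEmpty then none else some p
    | none => none
  let verdict := pvVerdict inc? exc? pat? cases
  -- verdict[c.get("id")]: the key is always present (it was inserted while scanning the same list),
  -- so the default false is never used — exact
  let out := cases.filter (fun c => verdict.getD (pvGetId c) false)
  match limit with
  | some n => PySem.List.slice out none (some n)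
  | none => out

-- ===== PRECONDITION & SPEC =====
def Spec_select_eval_cases (cases : List (List (String × String))) (include_ids : Option (List String)) (exclude_ids : Option (List String)) (pattern : Option String) (limit : Option Int) (out : List (List (String × String))) : Prop := out = select_eval_cases_alt cases include_ids exclude_ids pattern limit
instance (cases : List (List (String × String))) (include_ids : Option (List String)) (exclude_ids : Option (List String)) (pattern : Option String) (limit : Option Int) (out : List (List (String × String))) : Decidable (Spec_select_eval_cases cases include_ids exclude_ids pattern limit out) := by unfold Spec_select_eval_cases; infer_instance

-- ===== CLAIM (what is proved, stated in full; the proofs are below) =====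
def Claim_equal_select_eval_cases : Prop := ∀ (cases : List (List (String × String))) (include_ids : Option (List String)) (exclude_ids : Option (List String)) (pattern : Option String) (limit : Option Int), Dom_select_eval_cases cases include_ids exclude_ids pattern limit → Spec_select_eval_cases cases include_ids exclude_ids pattern limit (select_eval_cases cases include_ids exclude_ids pattern limit)

-- ===== LEMMAS AND PROOFS =====

-- every entry of the verdict-building fold is correct (value = pvOk of its key)
theorem verdict_sound (inc? exc? : Option (PySem.Set String)) (pat? : Option String)
    (cs : List (List (String × String))) (d : PySem.Dict (Option String) Bool)
    (hd : ∀ k b, d.get? k = some b → b = pvOk inc? exc? pat? k) :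
    ∀ k b, (cs.foldl (fun d c =>
      let i := pvGetId c
      if d.contains i then d else d.insert i (pvOk inc? exc? pat? i)) d).get? k = some b →
      b = pvOk inc? exc? pat? k := by
  induction cs generalizing d with
  | nil => exact hd
  | cons c rest ih =>
      intro k b h
      refine ih _ ?_ k b h
      intro k' b' h'
      dsimp only at h'
      by_cases hc : d.contains (pvGetId c) = true
      · simp only [hc, if_pos] at h'; exact hd k' b' h'
      · rw [if_neg hc] at h'
        by_cases hk : k' = pvGetId c
        · subst hk
          rw [PySem.Dict.get?_insert_self] at h'
          exact (Option.some.inj h').symm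
        · rw [PySem.Dict.get?_insert_of_ne _ _ hk] at h'
          exact hd k' b' h'

-- an already-present key stays present through the verdict-building fold
theorem verdict_mono (inc? exc? : Option (PySem.Set String)) (pat? : Option String)
    (cs : List (List (String × String))) (d : PySem.Dict (Option String) Bool)
    (k : Option String) (hk : (d.get? k).isSome) :
    ((cs.foldl (fun d c =>
      let i := pvGetId c
      if d.contains i then d else d.insert i (pvOk inc? exc? pat? i)) d).get? k).isSome := by
  induction cs generalizing d with
  | nil => exact hk
  | cons c rest ih =>
      simp only [List.foldl_cons]
      apply ih
      dsimp only
      by_cases hc : d.contains (pvGetId c) = true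
      · simpa [hc] using hk
      · rw [if_neg hc]
        by_cases hkk : k = pvGetId c
        · subst hkk; rw [PySem.Dict.get?_insert_self]; rfl
        · rw [PySem.Dict.get?_insert_of_ne _ _ hkk]; exact hk

-- the key of every scanned case is present in the final verdict table
theorem verdict_contains (inc? exc? : Option (PySem.Set String)) (pat? : Option String)
    (cs : List (List (String × String))) (d : PySem.Dict (Option String) Bool) :
    ∀ c ∈ cs, ((cs.foldl (fun d c =>
      let i := pvGetId c
      if d.contains i then d else d.insert i (pvOk inc? exc? pat? i)) d).get? (pvGetId c)).isSome := by
  induction cs generalizing d with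
  | nil => intro c h; cases h
  | cons c0 rest ih =>
      intro c hc
      rcases List.mem_cons.mp hc with hc | hc
      · subst hc
        simp only [List.foldl_cons]
        apply verdict_mono
        dsimp only
        by_cases h0 : d.contains (pvGetId c) = true
        · simp only [h0, if_pos]
          rw [PySem.Dict.contains_eq_isSome_get?] at h0; exact h0
        · rw [if_neg h0, PySem.Dict.get?_insert_self]; rfl
      · exact ih _ c hc

-- for a case in the scanned list, the table lookup IS the predicate
theorem verdict_getD (inc? exc? : Option (PySem.Set String)) (pat? : Option String)
    (cs : List (List (String × String))) (c : List (String × String)) (hc : c ∈ cs) :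
    (pvVerdict inc? exc? pat? cs).getD (pvGetId c) false = pvOk inc? exc? pat? (pvGetId c) := by
  have h1 := verdict_contains inc? exc? pat? cs PySem.Dict.empty c hc
  unfold pvVerdict
  rcases hs : ((cs.foldl (fun d c =>
      let i := pvGetId c
      if d.contains i then d else d.insert i (pvOk inc? exc? pat? i)) PySem.Dict.empty).get? (pvGetId c)) with _ | b
  · rw [hs] at h1; simp at h1
  · have := verdict_sound inc? exc? pat? cs PySem.Dict.empty
      (by intro k b h; simp [PySem.Dict.get?_empty] at h) (pvGetId c) b hs
    rw [PySem.Dict.getD_of_get?_eq_some _ _ hs, this]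

-- pvOk's guarded-assignment chain as a conjunction of the active conditions
theorem pvOk_eq (inc? exc? : Option (PySem.Set String)) (pat? : Option String) (i : Option String) :
    pvOk inc? exc? pat? i =
      ((match inc? with | some s => pvMemSet s i | none => true) &&
       (match exc? with | some s => !(pvMemSet s i) | none => true) &&
       (match pat? with | some p => PySem.Str.isIn p (i.getD "") | none => true)) := by
  unfold pvOk
  rcases inc? with _ | s <;> rcases exc? with _ | t <;> rcases pat? with _ | p <;>
    first
      | (cases hm : pvMemSet s i <;> cases ht : pvMemSet t i <;> simp [hm, ht])
      | (cases hm : pvMemSet s i <;> simp [hm])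
      | (cases ht : pvMemSet t i <;> simp [ht])
      | simp

-- A's staged filters compute the single filter by pvOk of the (conditionally active) filters
theorem kept_eq (cases : List (List (String × String))) (include_ids exclude_ids : Option (List String)) (pattern : Option String) :
    (let out := cases
     let out := match include_ids with
       | some ids =>
           if ids.isEmpty then out else
             out.filter (fun c => match pvGetId c with
               | some v => PySem.Set.contains (PySem.Set.ofList ids) v
               | none => false)
       | none => out
     let out := match exclude_ids with
       | some ids =>
           if ids.isEmpty then out else
             out.filter (fun c => !(match pvGetId c with
               | some v => PySem.Set.contains (PySem.Set.ofList ids) v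
               | none => false))
       | none => out
     match pattern with
     | some p =>
         if p.isEmpty then out else
           out.filter (fun c => PySem.Str.isIn p ((pvGetId c).getD ""))
     | none => out) =
    cases.filter (fun c => pvOk
      (match include_ids with
        | some ids => if ids.isEmpty then none else some (PySem.Set.ofList ids)
        | none => none)
      (match exclude_ids with
        | some ids => if ids.isEmpty then none else some (PySem.Set.ofList ids)
        | none => none)
      (match pattern with
        | some p => if p.isEmpty then none else some p
        | none => none)
      (pvGetId c)) := by
  rcases include_ids with _ | inc <;> rcases exclude_ids with _ | exc <;> rcases pattern with _ | pat <;>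
    simp only [] <;>
    (try split_ifs) <;>
    (try simp_all [List.filter_filter]) <;>
    first
      | (symm; apply List.filter_eq_self.mpr; intro c _; simp [pvOk_eq])
      | (apply List.filter_congr; intro c _;
         rcases h : pvGetId c with _ | v <;>
           simp [pvOk_eq, pvMemSet, Bool.and_comm, Bool.and_assoc])

-- ===== VERDICT (by name: the statement is the Claim_ definition above) =====
theorem select_eval_cases_spec : Claim_equal_select_eval_cases := by
  intro cases include_ids exclude_ids pattern limit _
  unfold Spec_select_eval_cases select_eval_cases select_eval_cases_alt
  have h := kept_eq cases include_ids exclude_ids pattern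
  simp only [] at h ⊢
  rw [h]
  have hf : cases.filter (fun c =>
      (pvVerdict
        (match include_ids with
          | some ids => if ids.isEmpty then none else some (PySem.Set.ofList ids)
          | none => none)
        (match exclude_ids with
          | some ids => if ids.isEmpty then none else some (PySem.Set.ofList ids)
          | none => none)
        (match pattern with
          | some p => if p.isEmpty then none else some p
          | none => none) cases).getD (pvGetId c) false) =
      cases.filter (fun c => pvOk
        (match include_ids with
          | some ids => if ids.isEmpty then none else some (PySem.Set.ofList ids)
          | none => none)
        (match exclude_ids with
          | some ids => if ids.isEmpty then none else some (PySem.Set.ofList ids)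
          | none => none)
        (match pattern with
          | some p => if p.isEmpty then none else some p
          | none => none)
        (pvGetId c)) := by
    apply List.filter_congr
    intro c hc
    rw [verdict_getD _ _ _ _ c hc]
  rw [hf]
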